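-- pv_equiv track=rewrite | github.com/bilalakil/challenges | codechef/ltime47/segm01.py | calc
-- ===== SOURCE A (Python) =====
-- def calc(s):
--     '''
--     Returns a boolean.
--     '''
--
--     has_1 = False
--
--     for l in s.strip('0'):
--         if l == '1':
--             has_1 = True
--
--         if l == '0' and has_1:
--             return False
--
--     return has_1
-- ===== SOURCE B (Python) =====
-- def delta(state, c):
--     '''Transition of a 4-state DFA: 0 = no '1' seen, 1 = seen '1',
--     2 = seen '1' then only '0's since, 3 = dead.'''
--     if state == 0:
--         return 1 if c == '1' else 0
--     if state == 1:
--         return 2 if c == '0' else 1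
--     if state == 2:
--         return 2 if c == '0' else 3
--     return 3
--
--
-- def calc(s):
--     '''
--     Returns a boolean.
--     '''
--     state = 0
--     for c in s:
--         state = delta(state, c)
--     return state == 1 or state == 2
-- ===== Notes on version B (the rewrite author's own statement) =====
-- stated objective: alternative
-- what changed: Replaces A's strip-zeros preprocessing plus a per-character loop with a seen-one flag and early return by a single fold of the raw string through an explicit 4-state DFA transition table, accepting in states 1 and 2 (state 2 absorbs would-be trailing zeros, making the strip unnecessary).
import Mathlib
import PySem

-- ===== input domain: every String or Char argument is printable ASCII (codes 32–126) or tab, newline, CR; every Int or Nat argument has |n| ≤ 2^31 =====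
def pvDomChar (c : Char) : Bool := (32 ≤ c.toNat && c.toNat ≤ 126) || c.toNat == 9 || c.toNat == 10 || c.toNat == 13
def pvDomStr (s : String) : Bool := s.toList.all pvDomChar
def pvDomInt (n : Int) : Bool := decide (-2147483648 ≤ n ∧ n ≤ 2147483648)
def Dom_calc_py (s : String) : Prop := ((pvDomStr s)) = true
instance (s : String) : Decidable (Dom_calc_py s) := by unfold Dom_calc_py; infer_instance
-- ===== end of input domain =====

-- B replaces A's strip('0') pass + flagged loop with early return by one fold of the raw
-- string through an explicit 4-state DFA table (alternative decomposition, same cost).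

-- ===== PORT A =====
-- the for-loop over s.strip('0') with running flag has_1 and early 'return False'
def calcLoopA : List Char → Bool → Bool
  | [], has1 => has1
  | l :: rest, has1 =>
    let has1 := if l == '1' then true else has1
    if l == '0' && has1 then false else calcLoopA rest has1

def calc_py (s : String) : Bool :=
  calcLoopA (PySem.Str.stripChars s "0").toList false

-- ===== PORT B =====
-- delta(state, c): transition of the 4-state DFA (0 no '1' yet, 1 seen '1',
-- 2 seen '1' then only '0's since, 3 dead)
def dfaDelta (state : Int) (c : Char) : Int :=
  if state == 0 then (if c == '1' then 1 else 0)
  else if state == 1 then (if c == '0' then 2 else 1)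
  else if state == 2 then (if c == '0' then 2 else 3)
  else 3

def calc_py_alt (s : String) : Bool :=
  let state := s.toList.foldl dfaDelta 0
  state == 1 || state == 2

-- ===== PRECONDITION & SPEC =====
def Spec_calc_py (s : String) (out : Bool) : Prop := out = calc_py_alt s
instance (s : String) (out : Bool) : Decidable (Spec_calc_py s out) := by unfold Spec_calc_py; infer_instance

-- ===== CLAIM (what is proved, stated in full; the proofs are below) =====
def Claim_equal_calc_py : Prop := ∀ (s : String), Dom_calc_py s → Spec_calc_py s (calc_py s)

-- ===== LEMMAS AND PROOFS =====

-- acceptance test of B's DFA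
def dfaAccept (st : Int) : Bool := st == 1 || st == 2

-- the dead state absorbs
theorem run_dead (cs : List Char) : cs.foldl dfaDelta 3 = 3 := by
  induction cs with
  | nil => rfl
  | cons c rest ih => simpa [dfaDelta] using ih

-- leading '0' characters leave state 0 unchanged
theorem run_dropWhile_zero (cs : List Char) :
    cs.foldl dfaDelta 0 = (cs.dropWhile (fun c => c == '0')).foldl dfaDelta 0 := by
  induction cs with
  | nil => rfl
  | cons c rest ih =>
    by_cases h : c = '0'
    · subst h; simpa [dfaDelta, List.dropWhile_cons] using ih
    · simp [h]

-- a block of '0' characters never changes the acceptance status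
theorem accept_run_zeros (zs : List Char) (h : ∀ c ∈ zs, c = '0') (st : Int) :
    dfaAccept (zs.foldl dfaDelta st) = dfaAccept st := by
  induction zs generalizing st with
  | nil => rfl
  | cons c rest ih =>
    have hc : c = '0' := h c (by simp)
    have hrest : ∀ c ∈ rest, c = '0' := fun c hm => h c (by simp [hm])
    subst hc
    rw [List.foldl_cons, ih hrest]
    by_cases h0 : st = 0
    · subst h0; rfl
    · by_cases h1 : st = 1
      · subst h1; rfl
      · by_cases h2 : st = 2
        · subst h2; rfl
        · simp [dfaDelta, dfaAccept, h0, h1, h2]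

-- cons does not change getLast? of a nonempty list
theorem getLast?_cons_ne {a : Type} (x : a) (l : List a) (h : l ≠ []) :
    (x :: l).getLast? = l.getLast? := by
  cases hl : l.getLast? with
  | none => exact absurd (List.getLast?_eq_none_iff.mp hl) h
  | some y => rw [List.getLast?_cons, hl]; rfl

-- from state 2, a nonempty block not ending in '0' is rejected
theorem run_two_false (cs : List Char) (hne : cs ≠ [])
    (hlast : cs.getLast? ≠ some '0') : dfaAccept (cs.foldl dfaDelta 2) = false := by
  induction cs with
  | nil => exact absurd rfl hne
  | cons c rest ih =>
    by_cases h : c = '0'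
    · subst h
      have hr : rest ≠ [] := by
        rintro rfl; exact hlast rfl
      have : rest.getLast? ≠ some '0' := by
        rwa [getLast?_cons_ne '0' rest hr] at hlast
      simpa [dfaDelta] using ih hr this
    · have : rest.foldl dfaDelta 3 = 3 := run_dead rest
      simp [dfaDelta, h, this, dfaAccept]

-- on a list not ending in '0', A's loop from flag=false/true matches the DFA from state 0/1
theorem main_core (cs : List Char) (hlast : cs.getLast? ≠ some '0') :
    calcLoopA cs false = dfaAccept (cs.foldl dfaDelta 0) ∧
    calcLoopA cs true = dfaAccept (cs.foldl dfaDelta 1) := by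
  induction cs with
  | nil => exact ⟨rfl, rfl⟩
  | cons c rest ih =>
    have hrest : rest ≠ [] → rest.getLast? ≠ some '0' := by
      intro hr
      rwa [getLast?_cons_ne c rest hr] at hlast
    by_cases hr : rest = []
    · subst hr
      have hc : c ≠ '0' := by
        intro h; exact hlast (by simp [h])
      by_cases h1 : c = '1'
      · subst h1; exact ⟨rfl, rfl⟩
      · constructor <;> simp [calcLoopA, dfaDelta, dfaAccept, h1, hc]
    · obtain ⟨ihF, ihT⟩ := ih (hrest hr)
      constructor
      · by_cases h1 : c = '1'
        · subst h1; simpa [calcLoopA, dfaDelta] using ihT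
        · by_cases h0 : c = '0'
          · subst h0; simpa [calcLoopA, dfaDelta] using ihF
          · simpa [calcLoopA, dfaDelta, h1, h0] using ihF
      · by_cases h0 : c = '0'
        · subst h0
          have := run_two_false rest hr (hrest hr)
          simp [calcLoopA, dfaDelta, this]
        · by_cases h1 : c = '1'
          · subst h1; simpa [calcLoopA, dfaDelta] using ihT
          · simpa [calcLoopA, dfaDelta, h0, h1] using ihT

-- the stripped list does not end in '0'
theorem strip_getLast (cs : List Char) :
    (PySem.Chars.stripChars cs ['0']).getLast? ≠ some '0' := by
  intro h
  rw [PySem.Chars.stripChars, List.getLast?_reverse] at h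
  have := List.head?_dropWhile_not (fun c => List.contains ['0'] c)
      ((List.dropWhile (fun c => List.contains ['0'] c) cs).reverse)
  rw [h] at this
  exact absurd this (by decide)

-- acceptance on the raw list equals acceptance on the stripped list
theorem accept_strip (cs : List Char) :
    dfaAccept (cs.foldl dfaDelta 0) =
      dfaAccept ((PySem.Chars.stripChars cs ['0']).foldl dfaDelta 0) := by
  have hp : (fun c => List.contains ['0'] c) = (fun c : Char => c == '0') := by
    funext c; simp; rfl
  set p := fun c : Char => c == '0' with hpdef
  set t := cs.dropWhile p with ht
  have hsplit : t = (t.reverse.dropWhile p).reverse ++ (t.reverse.takeWhile p).reverse := by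
    conv_lhs => rw [← List.reverse_reverse t, ← List.takeWhile_append_dropWhile (p := p) (l := t.reverse)]
    rw [List.reverse_append]
  have hzeros : ∀ c ∈ (t.reverse.takeWhile p).reverse, c = '0' := by
    intro c hc
    rw [List.mem_reverse] at hc
    have h2 : p c = true := List.mem_takeWhile_imp (p := p) hc
    rw [hpdef] at h2
    simpa using h2
  rw [run_dropWhile_zero cs]
  rw [PySem.Chars.stripChars, hp, ← hpdef, ← ht]
  conv_lhs => rw [hsplit]
  rw [List.foldl_append]
  exact accept_run_zeros _ hzeros _

-- ===== VERDICT (by name: the statement is the Claim_ definition above) =====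
theorem calc_py_spec : Claim_equal_calc_py := by
  intro s _
  show calc_py s = calc_py_alt s
  unfold calc_py calc_py_alt
  have hb : (PySem.Str.stripChars s "0").toList = PySem.Chars.stripChars s.toList ['0'] := by
    simp [PySem.Str.toList_stripChars]
  rw [hb]
  have h1 := (main_core _ (strip_getLast s.toList)).1
  rw [h1, ← accept_strip]
  rfl
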